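-- pv_equiv track=rewrite | github.com/ftrepoxyz/FTRepo-next | .github/scripts/generate_json.py | group_by_bundle
-- ===== SOURCE A (Python) =====
-- def group_by_bundle(apps):
--     """Group apps by bundle ID, sorted by date descending."""
--     groups = {}
--     for app in apps:
--         bid = app["bundle_id"]
--         if bid not in groups:
--             groups[bid] = []
--         groups[bid].append(app)
--
--     for bid in groups:
--         groups[bid].sort(key=lambda a: a["date"], reverse=True)
--
--     return groups
-- ===== SOURCE B (Python) =====
-- def group_by_bundle(apps):
--     """Group apps by bundle ID, sorted by date descending."""
--     groups = {app["bundle_id"]: [] for app in apps}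
--     for app in sorted(apps, key=lambda a: a["date"], reverse=True):
--         groups[app["bundle_id"]].append(app)
--     return groups
-- ===== Notes on version B (the rewrite author's own statement) =====
-- stated objective: alternative
-- what changed: Instead of grouping first and then sorting each group separately, B builds the key skeleton in first-appearance order and fills it with ONE global stable descending sort over all apps, relying on sort stability to make each group come out date-descending with identical tie-breaking.
import Mathlib
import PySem

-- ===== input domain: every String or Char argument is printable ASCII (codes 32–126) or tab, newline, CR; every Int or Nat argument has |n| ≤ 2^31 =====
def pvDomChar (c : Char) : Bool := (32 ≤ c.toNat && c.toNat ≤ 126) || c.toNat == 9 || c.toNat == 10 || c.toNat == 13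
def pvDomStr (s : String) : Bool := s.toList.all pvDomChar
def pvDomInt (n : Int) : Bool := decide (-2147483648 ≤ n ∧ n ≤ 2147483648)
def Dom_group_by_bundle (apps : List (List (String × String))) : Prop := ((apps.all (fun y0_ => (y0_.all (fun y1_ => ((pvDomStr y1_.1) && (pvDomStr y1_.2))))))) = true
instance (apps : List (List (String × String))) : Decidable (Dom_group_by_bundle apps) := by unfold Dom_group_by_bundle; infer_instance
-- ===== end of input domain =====

-- B builds the key skeleton in first-appearance order and fills it with ONE global stable
-- descending sort instead of grouping first and then sorting each group (objective: alternative).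

-- ===== PORT A =====
-- app["bundle_id"] / app["date"]: Python raises KeyError when the key is absent; Pre_ excludes
-- exactly those inputs, so the "" default is never reached on admitted inputs.
def bidOf (a : List (String × String)) : String := (PySem.Dict.ofList a).getD "bundle_id" ""
def dateOf (a : List (String × String)) : String := (PySem.Dict.ofList a).getD "date" ""

def group_by_bundle (apps : List (List (String × String))) : List (String × List (List (String × String))) :=
  -- groups = {}; for app in apps: bid = app["bundle_id"]; if bid not in groups: groups[bid] = []; groups[bid].append(app)
  -- for bid in groups: groups[bid].sort(key=lambda a: a["date"], reverse=True); return groups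
  ((apps.foldl (fun g app =>
      (if g.contains (bidOf app) then g else g.insert (bidOf app) []).modify (bidOf app) []
        (fun v => v ++ [app])) PySem.Dict.empty).keys.foldl
    (fun d bid => d.modify bid [] (fun v => PySem.List.sorted v dateOf true))
    (apps.foldl (fun g app =>
      (if g.contains (bidOf app) then g else g.insert (bidOf app) []).modify (bidOf app) []
        (fun v => v ++ [app])) PySem.Dict.empty)).items

-- ===== PORT B =====
def group_by_bundle_alt (apps : List (List (String × String))) : List (String × List (List (String × String))) :=
  -- groups = {app["bundle_id"]: [] for app in apps}
  -- for app in sorted(apps, key=lambda a: a["date"], reverse=True): groups[app["bundle_id"]].append(app)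
  ((PySem.List.sorted apps dateOf true).foldl
    (fun g app => g.modify (bidOf app) [] (fun v => v ++ [app]))
    (apps.foldl (fun g app => g.insert (bidOf app) []) PySem.Dict.empty)).items

-- ===== PRECONDITION & SPEC =====
-- Pre_ excludes apps lacking a "bundle_id" or "date" key, on which A raises KeyError, and apps
-- whose pair list repeats a key, which no Python dict can represent (the encoding is ambiguous there).
def Pre_group_by_bundle (apps : List (List (String × String))) : Prop :=
  ∀ a ∈ apps, (a.map Prod.fst).Nodup ∧ "bundle_id" ∈ a.map Prod.fst ∧ "date" ∈ a.map Prod.fst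
instance (apps : List (List (String × String))) : Decidable (Pre_group_by_bundle apps) := by
  unfold Pre_group_by_bundle; infer_instance

def pvWitness_group_by_bundle : (List (List (String × String))) :=
  [[("bundle_id", "a"), ("date", "2")], [("bundle_id", "b"), ("date", "1")],
   [("bundle_id", "a"), ("date", "1")]]

def Spec_group_by_bundle (apps : List (List (String × String))) (out : List (String × List (List (String × String)))) : Prop := out = group_by_bundle_alt apps
instance (apps : List (List (String × String))) (out : List (String × List (List (String × String)))) : Decidable (Spec_group_by_bundle apps out) := by unfold Spec_group_by_bundle; infer_instance

-- ===== CLAIM (what is proved, stated in full; the proofs are below) =====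
def Claim_equal_group_by_bundle : Prop := ∀ (apps : List (List (String × String))), Dom_group_by_bundle apps → Pre_group_by_bundle apps → Spec_group_by_bundle apps (group_by_bundle apps)

-- ===== LEMMAS AND PROOFS =====

-- canonical grouping dicts: a list of keys paired with a value function
def keyed {ν : Type} (f : String → ν) (l : List String) : List (String × ν) :=
  l.map (fun k => (k, f k))

theorem keyed_congr {ν : Type} (l : List String) (f g : String → ν)
    (h : ∀ k ∈ l, f k = g k) : keyed f l = keyed g l :=
  List.map_congr_left fun k hk => by rw [h k hk]

theorem contains_keyed {ν : Type} (f : String → ν) (l : List String) (k : String) :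
    (PySem.Dict.mk (keyed f l)).contains k = decide (k ∈ l) := by
  simp only [PySem.Dict.contains, keyed, List.any_map]
  induction l with
  | nil => simp
  | cons x t ih =>
    by_cases h : x = k
    · simp [List.any_cons, h]
    · have hne : ¬ k = x := fun hh => h hh.symm
      simp [List.any_cons, ih, h, hne, Function.comp]

theorem get?_keyed {ν : Type} (f : String → ν) (l : List String) (k : String) :
    (PySem.Dict.mk (keyed f l)).get? k = if k ∈ l then some (f k) else none := by
  induction l with
  | nil => simp [keyed, PySem.Dict.get?]
  | cons x t ih =>
    by_cases h : x = k
    · subst h; simp [keyed, PySem.Dict.get?_mk_cons]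
    · have hne : ¬ k = x := fun hh => h hh.symm
      simp [keyed, PySem.Dict.get?_mk_cons, h, hne] at ih ⊢
      exact ih

theorem insert_keyed_mem {ν : Type} (f : String → ν) (l : List String) (k : String) (v : ν)
    (h : k ∈ l) :
    (PySem.Dict.mk (keyed f l)).insert k v =
      PySem.Dict.mk (keyed (fun j => if j = k then v else f j) l) := by
  simp only [PySem.Dict.insert, contains_keyed, h, decide_true, if_true]
  apply congrArg PySem.Dict.mk
  simp only [keyed, List.map_map]
  apply List.map_congr_left
  intro j _
  by_cases hj : j = k <;> simp [hj, Function.comp]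

theorem insert_keyed_not_mem {ν : Type} (f : String → ν) (l : List String) (k : String) (v : ν)
    (h : k ∉ l) :
    (PySem.Dict.mk (keyed f l)).insert k v =
      PySem.Dict.mk (keyed (fun j => if j = k then v else f j) (l ++ [k])) := by
  simp only [PySem.Dict.insert, contains_keyed, h, decide_false, Bool.false_eq_true, if_false]
  apply congrArg PySem.Dict.mk
  simp only [keyed, List.map_append, List.map_cons, List.map_nil]
  apply congrArg (· ++ [(k, v)])
  apply List.map_congr_left
  intro j hj
  have hjk : ¬ j = k := fun hh => h (hh ▸ hj)
  simp [hjk]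

theorem modify_keyed {ν : Type} (f : String → ν) (l : List String) (k : String) (d : ν)
    (g : ν → ν) (h : k ∈ l) :
    (PySem.Dict.mk (keyed f l)).modify k d g =
      PySem.Dict.mk (keyed (fun j => if j = k then g (f k) else f j) l) := by
  simp only [PySem.Dict.modify, PySem.Dict.getD, get?_keyed, h, if_true, Option.getD_some]
  exact insert_keyed_mem f l k (g (f k)) h

theorem keys_keyed {ν : Type} (f : String → ν) (l : List String) :
    (PySem.Dict.mk (keyed f l)).keys = l := by
  simp [PySem.Dict.keys, keyed, List.map_map, Function.comp_def]

-- dedup of a snoc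
theorem dedup_snoc {α : Type} [BEq α] [LawfulBEq α] (xs : List α) (x : α) :
    PySem.List.dedup (xs ++ [x]) =
      if x ∈ PySem.List.dedup xs then PySem.List.dedup xs
      else PySem.List.dedup xs ++ [x] := by
  rw [PySem.List.dedup_eq_ofList, PySem.Set.ofList_eq_foldl, List.foldl_append]
  simp only [List.foldl_cons, List.foldl_nil]
  rw [← PySem.Set.ofList_eq_foldl, ← PySem.List.dedup_eq_ofList, PySem.Set.add_eq_ite]

-- ---- stability: filtering commutes with the descending insertion sort ----

theorem insertBy_all_before {α : Type} (bf : α → α → Bool) (x : α) (l : List α)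
    (h : ∀ z ∈ l, bf x z = true) :
    PySem.List.insertBy bf x l = x :: l := by
  cases l with
  | nil => simp [PySem.List.insertBy]
  | cons y t => simp [PySem.List.insertBy, h y List.mem_cons_self]

theorem insertBy_cons_not_before {α : Type} (key : α → String) (x y : α) (t : List α)
    (hb : ¬ key y < key x) :
    PySem.List.insertBy (fun a b => decide (key b < key a)) x (y :: t) =
      y :: PySem.List.insertBy (fun a b => decide (key b < key a)) x t := by
  simp [PySem.List.insertBy, hb]

theorem pairwise_insertBy {α : Type} (key : α → String) (x : α) (l : List α)
    (h : l.Pairwise (fun a b => key b ≤ key a)) :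
    (PySem.List.insertBy (fun a b => decide (key b < key a)) x l).Pairwise
      (fun a b => key b ≤ key a) := by
  induction l with
  | nil => simp [PySem.List.insertBy]
  | cons y t ih =>
    rw [List.pairwise_cons] at h
    obtain ⟨hy, ht⟩ := h
    by_cases hb : key y < key x
    · simp only [PySem.List.insertBy, hb, decide_true, if_true]
      rw [List.pairwise_cons]
      refine ⟨?_, ?_⟩
      · intro z hz
        rcases List.mem_cons.mp hz with rfl | hz'
        · exact le_of_lt hb
        · exact le_trans (hy z hz') (le_of_lt hb)
      · rw [List.pairwise_cons]; exact ⟨hy, ht⟩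
    · rw [insertBy_cons_not_before key x y t hb, List.pairwise_cons]
      refine ⟨?_, ih ht⟩
      intro z hz
      rcases (PySem.List.mem_insertBy _ _ _ _).mp hz with rfl | hz'
      · exact not_lt.mp hb
      · exact hy z hz'

theorem filter_insertBy {α : Type} (key : α → String) (p : α → Bool) (x : α)
    (l : List α) (h : l.Pairwise (fun a b => key b ≤ key a)) :
    (PySem.List.insertBy (fun a b => decide (key b < key a)) x l).filter p =
      if p x then PySem.List.insertBy (fun a b => decide (key b < key a)) x (l.filter p)
      else l.filter p := by
  induction l with
  | nil =>
    by_cases hp : p x <;> simp [PySem.List.insertBy, hp]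
  | cons y t ih =>
    rw [List.pairwise_cons] at h
    obtain ⟨hy, ht⟩ := h
    by_cases hb : key y < key x
    · simp only [PySem.List.insertBy, hb, decide_true, if_true]
      have hall : PySem.List.insertBy (fun a b => decide (key b < key a)) x
          ((y :: t).filter p) = x :: (y :: t).filter p := by
        apply insertBy_all_before
        intro z hz
        have hz' := List.mem_of_mem_filter hz
        rcases List.mem_cons.mp hz' with rfl | hz''
        · simp [hb]
        · simp [lt_of_le_of_lt (hy z hz'') hb]
      rw [hall, List.filter_cons]
    · rw [insertBy_cons_not_before key x y t hb, List.filter_cons, List.filter_cons]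
      by_cases hpy : p y
      · rw [if_pos hpy, if_pos hpy, ih ht]
        by_cases hp : p x
        · rw [if_pos hp, if_pos hp, insertBy_cons_not_before key x y (List.filter p t) hb]
        · rw [if_neg hp, if_neg hp]
      · rw [if_neg hpy, if_neg hpy]
        exact ih ht

theorem filter_foldl_insertBy {α : Type} (key : α → String) (p : α → Bool)
    (xs : List α) : ∀ (acc : List α), acc.Pairwise (fun a b => key b ≤ key a) →
    (xs.foldl (fun acc x => PySem.List.insertBy (fun a b => decide (key b < key a)) x acc) acc).filter p =
      (xs.filter p).foldl (fun acc x => PySem.List.insertBy (fun a b => decide (key b < key a)) x acc)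
        (acc.filter p) := by
  induction xs with
  | nil => intro acc _; simp
  | cons x t ih =>
    intro acc hacc
    simp only [List.foldl_cons]
    rw [ih _ (pairwise_insertBy key x acc hacc), filter_insertBy key p x acc hacc]
    by_cases hp : p x <;> simp [hp]

theorem filter_sorted_rev {α : Type} (key : α → String) (p : α → Bool) (xs : List α) :
    (PySem.List.sorted xs key true).filter p = PySem.List.sorted (xs.filter p) key true := by
  rw [PySem.List.sorted_rev_eq_foldl_insertBy, PySem.List.sorted_rev_eq_foldl_insertBy,
    filter_foldl_insertBy key p xs [] (by simp)]
  simp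

-- ---- the loop invariants ----

theorem stepA_canon (pre : List (List (String × String))) (a : List (String × String)) :
    (if (PySem.Dict.mk (keyed (fun k => pre.filter (fun x => bidOf x == k))
          (PySem.List.dedup (pre.map bidOf)))).contains (bidOf a) then
        PySem.Dict.mk (keyed (fun k => pre.filter (fun x => bidOf x == k))
          (PySem.List.dedup (pre.map bidOf)))
      else
        (PySem.Dict.mk (keyed (fun k => pre.filter (fun x => bidOf x == k))
          (PySem.List.dedup (pre.map bidOf)))).insert (bidOf a) []).modify (bidOf a) []
        (fun v => v ++ [a]) =
    PySem.Dict.mk (keyed (fun k => (pre ++ [a]).filter (fun x => bidOf x == k))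
      (PySem.List.dedup ((pre ++ [a]).map bidOf))) := by
  have hded : PySem.List.dedup ((pre ++ [a]).map bidOf) =
      if bidOf a ∈ PySem.List.dedup (pre.map bidOf) then PySem.List.dedup (pre.map bidOf)
      else PySem.List.dedup (pre.map bidOf) ++ [bidOf a] := by
    rw [List.map_append, List.map_cons, List.map_nil, dedup_snoc]
  by_cases hm : bidOf a ∈ pre.map bidOf
  · have hmd : bidOf a ∈ PySem.List.dedup (pre.map bidOf) :=
      (PySem.List.mem_dedup _ _).mpr hm
    rw [contains_keyed]
    simp only [hmd, decide_true, if_true]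
    rw [modify_keyed _ _ _ _ _ hmd, hded, if_pos hmd]
    apply congrArg PySem.Dict.mk
    apply keyed_congr
    intro k _
    simp only [List.filter_append, List.filter_cons, List.filter_nil]
    by_cases hk : k = bidOf a
    · subst hk; simp
    · have hbk : ¬ (bidOf a == k) = true := fun hh => hk (beq_iff_eq.mp hh).symm
      simp [hbk, hk]
  · have hmd : bidOf a ∉ PySem.List.dedup (pre.map bidOf) := fun hh =>
      hm ((PySem.List.mem_dedup _ _).mp hh)
    rw [contains_keyed]
    simp only [hmd, decide_false, Bool.false_eq_true, if_false]
    rw [insert_keyed_not_mem _ _ _ _ hmd,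
      modify_keyed _ _ _ _ _ (List.mem_append_right _ List.mem_cons_self),
      hded, if_neg hmd]
    apply congrArg PySem.Dict.mk
    apply keyed_congr
    intro k _
    simp only [List.filter_append, List.filter_cons, List.filter_nil]
    by_cases hk : k = bidOf a
    · subst hk
      have hnil : pre.filter (fun x => bidOf x == bidOf a) = [] := by
        rw [List.filter_eq_nil_iff]
        intro x hx
        have hmem : bidOf x ∈ pre.map bidOf := List.mem_map_of_mem hx
        simp only [beq_iff_eq]
        intro hxa
        exact hm (hxa ▸ hmem)
      simp [hnil]
    · have hbk : ¬ (bidOf a == k) = true := fun hh => hk (beq_iff_eq.mp hh).symm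
      simp [hbk, hk]

theorem foldA (xs : List (List (String × String))) :
    ∀ (pre : List (List (String × String))),
    xs.foldl (fun g app =>
        (if g.contains (bidOf app) then g else g.insert (bidOf app) []).modify (bidOf app) []
          (fun v => v ++ [app]))
      (PySem.Dict.mk (keyed (fun k => pre.filter (fun x => bidOf x == k))
        (PySem.List.dedup (pre.map bidOf)))) =
    PySem.Dict.mk (keyed (fun k => (pre ++ xs).filter (fun x => bidOf x == k))
      (PySem.List.dedup ((pre ++ xs).map bidOf))) := by
  induction xs with
  | nil => intro pre; simp
  | cons a t ih =>
    intro pre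
    simp only [List.foldl_cons]
    rw [stepA_canon pre a, ih (pre ++ [a])]
    simp

theorem foldSort (ks : List String) :
    ∀ (f : String → List (List (String × String))) (l : List String), ks.Nodup →
    (∀ k ∈ ks, k ∈ l) →
    ks.foldl (fun d bid => d.modify bid [] (fun v => PySem.List.sorted v dateOf true))
      (PySem.Dict.mk (keyed f l)) =
    PySem.Dict.mk (keyed (fun k => if k ∈ ks then PySem.List.sorted (f k) dateOf true else f k) l) := by
  induction ks with
  | nil => intro f l _ _; simp
  | cons k₀ t ih =>
    intro f l hnd hsub
    obtain ⟨hk₀, hndt⟩ := List.nodup_cons.mp hnd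
    simp only [List.foldl_cons]
    rw [modify_keyed f l k₀ [] _ (hsub k₀ List.mem_cons_self),
      ih _ l hndt (fun k hk => hsub k (List.mem_cons_of_mem _ hk))]
    apply congrArg PySem.Dict.mk
    apply keyed_congr
    intro k _
    by_cases h1 : k = k₀
    · subst h1; simp [hk₀]
    · by_cases h2 : k ∈ t <;> simp [h1, h2]

theorem foldSkel (xs : List (List (String × String))) :
    ∀ (pre : List (List (String × String))),
    xs.foldl (fun g app => g.insert (bidOf app) [])
      (PySem.Dict.mk (keyed (fun _ => ([] : List (List (String × String))))
        (PySem.List.dedup (pre.map bidOf)))) =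
    PySem.Dict.mk (keyed (fun _ => ([] : List (List (String × String))))
      (PySem.List.dedup ((pre ++ xs).map bidOf))) := by
  induction xs with
  | nil => intro pre; simp
  | cons a t ih =>
    intro pre
    simp only [List.foldl_cons]
    have hded : PySem.List.dedup ((pre ++ [a]).map bidOf) =
        if bidOf a ∈ PySem.List.dedup (pre.map bidOf) then PySem.List.dedup (pre.map bidOf)
        else PySem.List.dedup (pre.map bidOf) ++ [bidOf a] := by
      rw [List.map_append, List.map_cons, List.map_nil, dedup_snoc]
    have hstep : (PySem.Dict.mk (keyed (fun _ => ([] : List (List (String × String))))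
        (PySem.List.dedup (pre.map bidOf)))).insert (bidOf a) [] =
        PySem.Dict.mk (keyed (fun _ => ([] : List (List (String × String))))
          (PySem.List.dedup ((pre ++ [a]).map bidOf))) := by
      by_cases hm : bidOf a ∈ PySem.List.dedup (pre.map bidOf)
      · rw [insert_keyed_mem _ _ _ _ hm, hded, if_pos hm]
        apply congrArg PySem.Dict.mk
        apply keyed_congr
        intro k _
        simp
      · rw [insert_keyed_not_mem _ _ _ _ hm, hded, if_neg hm]
        apply congrArg PySem.Dict.mk
        apply keyed_congr
        intro k _
        simp
    rw [hstep, ih (pre ++ [a])]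
    simp

theorem foldFill (xs : List (List (String × String))) :
    ∀ (f : String → List (List (String × String))) (l : List String),
    (∀ a ∈ xs, bidOf a ∈ l) →
    xs.foldl (fun g app => g.modify (bidOf app) [] (fun v => v ++ [app]))
      (PySem.Dict.mk (keyed f l)) =
    PySem.Dict.mk (keyed (fun k => f k ++ xs.filter (fun x => bidOf x == k)) l) := by
  induction xs with
  | nil => intro f l _; simp
  | cons a t ih =>
    intro f l hall
    simp only [List.foldl_cons]
    rw [modify_keyed f l (bidOf a) [] _ (hall a List.mem_cons_self),
      ih _ l (fun b hb => hall b (List.mem_cons_of_mem _ hb))]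
    apply congrArg PySem.Dict.mk
    apply keyed_congr
    intro k _
    simp only [List.filter_cons]
    by_cases hk : k = bidOf a
    · subst hk; simp
    · have hbk : ¬ (bidOf a == k) = true := fun hh => hk (beq_iff_eq.mp hh).symm
      simp [hbk, hk]

-- ===== VERDICT (by name: the statement is the Claim_ definition above) =====
theorem group_by_bundle_spec : Claim_equal_group_by_bundle := by
  intro apps _ _
  unfold Spec_group_by_bundle group_by_bundle group_by_bundle_alt
  have hA := foldA apps []
  have hB := foldSkel apps []
  have h0A : PySem.Dict.mk (keyed (fun k => List.filter (fun x => bidOf x == k) [])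
      (PySem.List.dedup (List.map bidOf []))) =
      (PySem.Dict.empty : PySem.Dict String (List (List (String × String)))) := rfl
  have h0B : PySem.Dict.mk (keyed (fun _ => ([] : List (List (String × String))))
      (PySem.List.dedup (List.map bidOf []))) =
      (PySem.Dict.empty : PySem.Dict String (List (List (String × String)))) := rfl
  rw [h0A] at hA
  rw [h0B] at hB
  simp only [List.nil_append] at hA hB
  rw [hA, hB, keys_keyed,
    foldSort (PySem.List.dedup (apps.map bidOf)) _ _ (PySem.List.nodup_dedup _)
      (fun k hk => hk),
    foldFill (PySem.List.sorted apps dateOf true) _ _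
      (fun a ha => (PySem.List.mem_dedup _ _).mpr
        (List.mem_map_of_mem ((PySem.List.mem_sorted _ _ _ _).mp ha)))]
  exact congrArg PySem.Dict.items (congrArg PySem.Dict.mk
    (keyed_congr _ _ _ (fun k hk => by
      simp only [if_pos hk, List.nil_append, filter_sorted_rev])))
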